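-- pv_equiv track=rewrite | github.com/LMHoang20/thesis-codecontest-solver | leetcode2.py | remove_space_before_after_punctuation
-- ===== SOURCE A (Python) =====
-- def remove_space_before_after_punctuation(text):
--     punctuation_before = {',', '.', '?', '!', ':', ';', ')', ']', '}'}
--     for p in punctuation_before:
--         text = text.replace(f' {p}', p)
--     punctuation_after = {'(', '[', '{'}
--     for p in punctuation_after:
--         text = text.replace(f'{p} ', p)
--     return text
-- ===== SOURCE B (Python) =====
-- def remove_space_before_after_punctuation(text):
--     before = ",.?!:;)]}"
--     after = "([{"
--     result = []
--     prev = None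
--     for i, ch in enumerate(text):
--         nxt = text[i + 1] if i + 1 < len(text) else None
--         if not (ch == ' ' and ((nxt is not None and nxt in before) or (prev is not None and prev in after))):
--             result.append(ch)
--         prev = ch
--     return ''.join(result)
-- ===== Notes on version B (the rewrite author's own statement) =====
-- stated objective: alternative
-- what changed: Replaced the twelve sequential str.replace passes (one per punctuation mark) by a single left-to-right pass that drops a space exactly when its original neighbors qualify (next char in the closing set or previous char in the opening set).
import Mathlib
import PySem

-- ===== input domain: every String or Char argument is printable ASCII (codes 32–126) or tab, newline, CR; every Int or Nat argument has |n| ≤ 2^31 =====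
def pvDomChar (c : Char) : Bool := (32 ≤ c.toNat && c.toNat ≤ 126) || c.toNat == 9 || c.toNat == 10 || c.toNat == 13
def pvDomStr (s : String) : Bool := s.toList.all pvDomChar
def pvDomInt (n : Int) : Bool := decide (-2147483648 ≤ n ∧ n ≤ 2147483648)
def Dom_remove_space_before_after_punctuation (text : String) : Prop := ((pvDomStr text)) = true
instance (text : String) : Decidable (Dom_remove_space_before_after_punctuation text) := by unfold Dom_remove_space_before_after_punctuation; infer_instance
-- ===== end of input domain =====

-- B replaces A's twelve sequential str.replace passes by one left-to-right pass over the
-- original characters that drops a space exactly when its original neighbours qualify.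

-- ===== PORT A =====
-- the set literals are iterated in their written order (A's result is order-independent)
def remove_space_before_after_punctuation (text : String) : String :=
  let t1 := [',', '.', '?', '!', ':', ';', ')', ']', '}'].foldl
    (fun t p => PySem.Str.replace t (String.ofList [' ', p]) (String.ofList [p])) text
  ['(', '[', '{'].foldl
    (fun t p => PySem.Str.replace t (String.ofList [p, ' ']) (String.ofList [p])) t1

-- ===== PORT B =====
def pvBefore : List Char := [',', '.', '?', '!', ':', ';', ')', ']', '}']
def pvAfter : List Char := ['(', '[', '{']

-- nxt is not None and nxt in before
def pvNextBefore : Option Char → Bool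
  | some b => pvBefore.contains b
  | none => false

-- prev is not None and prev in after
def pvPrevAfter : Option Char → Bool
  | some a => pvAfter.contains a
  | none => false

-- the loop: prev carried along, nxt looked up as the head of the remaining characters
def pvGoB : Option Char → List Char → List Char
  | _, [] => []
  | prev, c :: rest =>
    if c = ' ' ∧ (pvNextBefore rest.head? || pvPrevAfter prev) = true then pvGoB (some c) rest
    else c :: pvGoB (some c) rest

def remove_space_before_after_punctuation_alt (text : String) : String :=
  String.ofList (pvGoB none text.toList)

-- ===== PRECONDITION & SPEC =====
def Spec_remove_space_before_after_punctuation (text : String) (out : String) : Prop := out = remove_space_before_after_punctuation_alt text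
instance (text : String) (out : String) : Decidable (Spec_remove_space_before_after_punctuation text out) := by unfold Spec_remove_space_before_after_punctuation; infer_instance

-- ===== CLAIM (what is proved, stated in full; the proofs are below) =====
def Claim_equal_remove_space_before_after_punctuation : Prop := ∀ (text : String), Dom_remove_space_before_after_punctuation text → Spec_remove_space_before_after_punctuation text (remove_space_before_after_punctuation text)

-- ===== LEMMAS AND PROOFS =====

-- single pass removing every space directly followed by a member of ps
def scanB (ps : List Char) : List Char → List Char
  | [] => []
  | [c] => [c]
  | a :: b :: r => if a = ' ' ∧ b ∈ ps then b :: scanB ps r else a :: scanB ps (b :: r)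

-- single pass removing every space directly preceded by a member of ps
def scanA (ps : List Char) : List Char → List Char
  | [] => []
  | [c] => [c]
  | a :: b :: r => if a ∈ ps ∧ b = ' ' then a :: scanA ps r else a :: scanA ps (b :: r)

lemma scanB_cons {c : Char} (ps : List Char) (h : c ≠ ' ') (X : List Char) :
    scanB ps (c :: X) = c :: scanB ps X := by
  cases X <;> simp [scanB, h]

lemma scanA_cons {c : Char} (ps : List Char) (h : c ∉ ps) (X : List Char) :
    scanA ps (c :: X) = c :: scanA ps X := by
  cases X <;> simp [scanA, h]

-- str.replace with pattern ' p' → 'p' is the single scan scanB [p]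
lemma go_before (p : Char) :
    ∀ (fuel : Nat) (l acc : List Char), l.length ≤ fuel →
      PySem.Chars.replace.go [' ', p] [p] fuel l acc = acc.reverse ++ scanB [p] l := by
  intro fuel
  induction fuel with
  | zero =>
    intro l acc h
    have : l = [] := by cases l <;> simp_all
    subst this
    simp [PySem.Chars.replace.go, scanB]
  | succ fuel ih =>
    intro l acc h
    match l with
    | [] => simp [PySem.Chars.replace.go, scanB]
    | c :: t =>
      rw [PySem.Chars.replace.go]
      by_cases hpre : [' ', p].isPrefixOf (c :: t) = true
      · obtain ⟨hc, r, ht⟩ : c = ' ' ∧ ∃ r, t = p :: r := by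
          cases t with
          | nil => simp [List.isPrefixOf] at hpre
          | cons b r =>
            simp [List.isPrefixOf] at hpre
            exact ⟨hpre.1.symm, r, by rw [hpre.2]⟩
        subst hc ht
        simp only [hpre, if_true]
        have hr : r.length ≤ fuel := by simp at h; omega
        rw [show List.drop [' ', p].length (' ' :: p :: r) = r by simp]
        rw [ih r ([p].reverse ++ acc) hr]
        simp [scanB]
      · simp only [hpre]
        rw [ih t (c :: acc) (by simp at h; omega)]
        cases t with
        | nil => simp [scanB]
        | cons b r =>
          have : ¬ (c = ' ' ∧ b = p) := by
            intro ⟨h1, h2⟩; subst h1 h2; simp [List.isPrefixOf] at hpre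
          simp [scanB, this]

-- str.replace with pattern 'p ' → 'p' is the single scan scanA [p]
lemma go_after (p : Char) :
    ∀ (fuel : Nat) (l acc : List Char), l.length ≤ fuel →
      PySem.Chars.replace.go [p, ' '] [p] fuel l acc = acc.reverse ++ scanA [p] l := by
  intro fuel
  induction fuel with
  | zero =>
    intro l acc h
    have : l = [] := by cases l <;> simp_all
    subst this
    simp [PySem.Chars.replace.go, scanA]
  | succ fuel ih =>
    intro l acc h
    match l with
    | [] => simp [PySem.Chars.replace.go, scanA]
    | c :: t =>
      rw [PySem.Chars.replace.go]
      by_cases hpre : [p, ' '].isPrefixOf (c :: t) = true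
      · obtain ⟨hc, r, ht⟩ : c = p ∧ ∃ r, t = ' ' :: r := by
          cases t with
          | nil => simp [List.isPrefixOf] at hpre
          | cons b r =>
            simp [List.isPrefixOf] at hpre
            exact ⟨hpre.1.symm, r, by rw [hpre.2]⟩
        subst ht
        simp only [hpre, if_true]
        have hr : r.length ≤ fuel := by simp at h; omega
        rw [show List.drop [p, ' '].length (c :: ' ' :: r) = r by simp]
        rw [ih r ([p].reverse ++ acc) hr]
        simp [scanA, hc]
      · simp only [hpre]
        rw [ih t (c :: acc) (by simp at h; omega)]
        cases t with
        | nil => simp [scanA]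
        | cons b r =>
          have : ¬ (c = p ∧ b = ' ') := by
            intro ⟨h1, h2⟩; subst h1 h2; simp [List.isPrefixOf] at hpre
          simp [scanA, this]

lemma replace_before (p : Char) (l : List Char) :
    PySem.Chars.replace l [' ', p] [p] = scanB [p] l := by
  rw [PySem.Chars.replace]
  simp only [List.isEmpty_cons, if_false, Bool.false_eq_true]
  exact go_before p l.length l [] le_rfl

lemma replace_after (p : Char) (l : List Char) :
    PySem.Chars.replace l [p, ' '] [p] = scanA [p] l := by
  rw [PySem.Chars.replace]
  simp only [List.isEmpty_cons, if_false, Bool.false_eq_true]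
  exact go_after p l.length l [] le_rfl

-- successive single-p scans accumulate into a set scan
lemma chainB (p : Char) (ps : List Char) (hp : p ≠ ' ') (hps : p ∉ ps)
    (hsp : ∀ q ∈ ps, q ≠ ' ') :
    ∀ (n : Nat) (l : List Char), l.length ≤ n → scanB [p] (scanB ps l) = scanB (p :: ps) l := by
  intro n
  induction n with
  | zero =>
    intro l h
    have : l = [] := by cases l <;> simp_all
    subst this; simp [scanB]
  | succ n ih =>
    intro l h
    match l with
    | [] => simp [scanB]
    | [c] => simp [scanB]
    | a :: b :: r =>
      simp only [List.length_cons] at h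
      by_cases hab : a = ' ' ∧ b ∈ ps
      · obtain ⟨ha, hb⟩ := hab
        subst ha
        have hbns : b ≠ ' ' := hsp b hb
        rw [show scanB ps (' ' :: b :: r) = b :: scanB ps r by simp [scanB, hb]]
        rw [scanB_cons [p] hbns, ih r (by omega)]
        simp [scanB, hb]
      · by_cases hap : a = ' ' ∧ b = p
        · obtain ⟨ha, hb⟩ := hap
          subst ha
          subst hb
          rw [show scanB ps (' ' :: b :: r) = ' ' :: scanB ps (b :: r) by
            simp [scanB, hps]]
          rw [scanB_cons ps hp r]
          rw [show scanB [b] (' ' :: b :: scanB ps r) = b :: scanB [b] (scanB ps r) by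
            simp [scanB]]
          rw [ih r (by omega)]
          simp [scanB]
        · by_cases ha : a = ' '
          · subst ha
            have hbp : b ≠ p := fun hh => hap ⟨rfl, hh⟩
            have hbps : b ∉ ps := fun hh => hab ⟨rfl, hh⟩
            rw [show scanB ps (' ' :: b :: r) = ' ' :: scanB ps (b :: r) by
              simp [scanB, hbps]]
            by_cases hbs : b = ' '
            · subst hbs
              match r with
              | [] => simp [scanB, hbp, hbps]
              | x :: xs =>
                by_cases hx : x ∈ ps
                · have hxs : x ≠ ' ' := hsp x hx
                  have hxp : x ≠ p := fun hh => hps (hh ▸ hx)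
                  rw [show scanB ps (' ' :: x :: xs) = x :: scanB ps xs by simp [scanB, hx]]
                  rw [show scanB [p] (' ' :: x :: scanB ps xs)
                      = ' ' :: x :: scanB [p] (scanB ps xs) by
                    simp [scanB, hxp]; rw [scanB_cons [p] hxs]]
                  rw [ih xs (by simp at h; omega)]
                  have : scanB (p :: ps) (' ' :: ' ' :: x :: xs)
                      = ' ' :: scanB (p :: ps) (' ' :: x :: xs) := by
                    simp [scanB, hbp, hbps]
                  rw [this]
                  simp [scanB, hx]
                · have hxps : scanB ps (' ' :: x :: xs) = ' ' :: scanB ps (x :: xs) := by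
                    simp [scanB, hx]
                  rw [hxps]
                  rw [show scanB [p] (' ' :: ' ' :: scanB ps (x :: xs))
                      = ' ' :: scanB [p] (' ' :: scanB ps (x :: xs)) by
                    simp [scanB, hbp]]
                  rw [← hxps, ih (' ' :: x :: xs) (by simp at h ⊢; omega)]
                  have : scanB (p :: ps) (' ' :: ' ' :: x :: xs)
                      = ' ' :: scanB (p :: ps) (' ' :: x :: xs) := by
                    simp [scanB, hbp, hbps]
                  rw [this]
            · rw [show scanB [p] (' ' :: scanB ps (b :: r))
                  = ' ' :: scanB [p] (scanB ps (b :: r)) by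
                rw [scanB_cons ps hbs r]
                simp [scanB, hbp]]
              rw [ih (b :: r) (by simp; omega)]
              have : scanB (p :: ps) (' ' :: b :: r) = ' ' :: scanB (p :: ps) (b :: r) := by
                simp [scanB, hbp, hbps]
              rw [this]
          · rw [scanB_cons ps ha (b :: r), scanB_cons [p] ha, ih (b :: r) (by simp; omega)]
            rw [show scanB (p :: ps) (a :: b :: r) = a :: scanB (p :: ps) (b :: r) by
              simp [scanB, ha]]

lemma scanA_expose (ps : List Char) (b : Char) (X : List Char) :
    ∃ Y, scanA ps (b :: X) = b :: Y := by
  cases X with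
  | nil => exact ⟨[], by simp [scanA]⟩
  | cons x xs =>
    by_cases h : b ∈ ps ∧ x = ' '
    · exact ⟨scanA ps xs, by simp [scanA, h]⟩
    · exact ⟨scanA ps (x :: xs), by simp [scanA, h]⟩

lemma chainA (p : Char) (ps : List Char) (hp : p ∉ ps) (hpns : p ≠ ' ')
    (hsp : ∀ q ∈ ps, q ≠ ' ') :
    ∀ (n : Nat) (l : List Char), l.length ≤ n → scanA [p] (scanA ps l) = scanA (p :: ps) l := by
  intro n
  induction n with
  | zero =>
    intro l h
    have : l = [] := by cases l <;> simp_all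
    subst this; simp [scanA]
  | succ n ih =>
    intro l h
    match l with
    | [] => simp [scanA]
    | [c] => simp [scanA]
    | a :: b :: r =>
      simp only [List.length_cons] at h
      by_cases hab : a ∈ ps ∧ b = ' '
      · obtain ⟨ha, hb⟩ := hab
        subst hb
        have hap : a ≠ p := fun hh => hp (hh ▸ ha)
        rw [show scanA ps (a :: ' ' :: r) = a :: scanA ps r by simp [scanA, ha]]
        rw [scanA_cons [p] (by simp [hap]), ih r (by omega)]
        simp [scanA, ha]
      · by_cases hap : a = p ∧ b = ' '
        · obtain ⟨ha, hb⟩ := hap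
          subst hb
          subst ha
          rw [show scanA ps (a :: ' ' :: r) = a :: scanA ps (' ' :: r) by simp [scanA, hp]]
          rw [scanA_cons ps (show (' ' : Char) ∉ ps from fun hh => hsp ' ' hh rfl) r]
          rw [show scanA [a] (a :: ' ' :: scanA ps r) = a :: scanA [a] (scanA ps r) by
            simp [scanA]]
          rw [ih r (by omega)]
          simp [scanA]
        · by_cases hb : b = ' '
          · subst hb
            have haps : a ∉ ps := fun hh => hab ⟨hh, rfl⟩
            have hanp : a ≠ p := fun hh => hap ⟨hh, rfl⟩
            rw [show scanA ps (a :: ' ' :: r) = a :: scanA ps (' ' :: r) by simp [scanA, haps]]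
            rw [scanA_cons ps (show (' ' : Char) ∉ ps from fun hh => hsp ' ' hh rfl) r]
            rw [show scanA [p] (a :: ' ' :: scanA ps r) = a :: scanA [p] (' ' :: scanA ps r) by
              simp [scanA, hanp]]
            rw [scanA_cons [p] (fun hh => hpns (List.mem_singleton.mp hh).symm), ih r (by omega)]
            rw [show scanA (p :: ps) (a :: ' ' :: r) = a :: scanA (p :: ps) (' ' :: r) by
              simp [scanA, haps, hanp]]
            rw [scanA_cons (p :: ps)
              (show (' ' : Char) ∉ p :: ps by
                simp; exact ⟨fun hh => hpns hh.symm, fun hh => hsp ' ' hh rfl⟩) r]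
          · rw [show scanA ps (a :: b :: r) = a :: scanA ps (b :: r) by simp [scanA, hb]]
            obtain ⟨Y, hY⟩ := scanA_expose ps b r
            rw [hY]
            rw [show scanA [p] (a :: b :: Y) = a :: scanA [p] (b :: Y) by simp [scanA, hb]]
            rw [← hY, ih (b :: r) (by simp; omega)]
            rw [show scanA (p :: ps) (a :: b :: r) = a :: scanA (p :: ps) (b :: r) by
              simp [scanA, hb]]

lemma scanB_congr (ps qs : List Char) (h : ∀ c, c ∈ ps ↔ c ∈ qs) :
    ∀ (n : Nat) (l : List Char), l.length ≤ n → scanB ps l = scanB qs l := by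
  intro n
  induction n with
  | zero =>
    intro l hl
    have : l = [] := by cases l <;> simp_all
    subst this; rfl
  | succ n ih =>
    intro l hl
    match l with
    | [] => rfl
    | [c] => rfl
    | a :: b :: r =>
      simp only [List.length_cons] at hl
      by_cases hab : a = ' ' ∧ b ∈ ps
      · rw [show scanB ps (a :: b :: r) = b :: scanB ps r by simp [scanB, hab]]
        rw [show scanB qs (a :: b :: r) = b :: scanB qs r by
          simp [scanB, hab.1, (h b).mp hab.2]]
        rw [ih r (by omega)]
      · rw [show scanB ps (a :: b :: r) = a :: scanB ps (b :: r) by simp [scanB, hab]]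
        rw [show scanB qs (a :: b :: r) = a :: scanB qs (b :: r) by
          have : ¬ (a = ' ' ∧ b ∈ qs) := fun ⟨h1, h2⟩ => hab ⟨h1, (h b).mpr h2⟩
          simp [scanB, this]]
        rw [ih (b :: r) (by simp; omega)]

lemma scanA_congr (ps qs : List Char) (h : ∀ c, c ∈ ps ↔ c ∈ qs) :
    ∀ (n : Nat) (l : List Char), l.length ≤ n → scanA ps l = scanA qs l := by
  intro n
  induction n with
  | zero =>
    intro l hl
    have : l = [] := by cases l <;> simp_all
    subst this; rfl
  | succ n ih =>
    intro l hl
    match l with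
    | [] => rfl
    | [c] => rfl
    | a :: b :: r =>
      simp only [List.length_cons] at hl
      by_cases hab : a ∈ ps ∧ b = ' '
      · rw [show scanA ps (a :: b :: r) = a :: scanA ps r by simp [scanA, hab]]
        rw [show scanA qs (a :: b :: r) = a :: scanA qs r by
          simp [scanA, hab.2, (h a).mp hab.1]]
        rw [ih r (by omega)]
      · rw [show scanA ps (a :: b :: r) = a :: scanA ps (b :: r) by simp [scanA, hab]]
        rw [show scanA qs (a :: b :: r) = a :: scanA qs (b :: r) by
          have : ¬ (a ∈ qs ∧ b = ' ') := fun ⟨h1, h2⟩ => hab ⟨(h a).mpr h1, h2⟩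
          simp [scanA, this]]
        rw [ih (b :: r) (by simp; omega)]

lemma before_ne_space : ∀ x ∈ pvBefore, x ≠ ' ' := by
  intro x hx; fin_cases hx <;> decide
lemma before_not_after : ∀ x ∈ pvBefore, x ∉ pvAfter := by
  intro x hx; fin_cases hx <;> decide

lemma pvPrevAfter_not_mem {c : Char} (h : c ∉ pvAfter) : pvPrevAfter (some c) = false := by
  simp [pvPrevAfter, h]

-- joint induction: the two set scans compose into B's single pass
lemma mainS : ∀ (n : Nat) (l : List Char), l.length ≤ n →
    ((∀ prev, pvPrevAfter prev = false →
        scanA pvAfter (scanB pvBefore l) = pvGoB prev l) ∧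
     (∀ a ∈ pvAfter, scanA pvAfter (a :: scanB pvBefore l) = a :: pvGoB (some a) l)) := by
  intro n
  induction n with
  | zero =>
    intro l h
    have : l = [] := by cases l <;> simp_all
    subst this
    exact ⟨fun prev _ => by simp [scanB, scanA, pvGoB],
           fun a _ => by simp [scanB, scanA, pvGoB]⟩
  | succ n ih =>
    intro l h
    have H1 : ∀ (l : List Char), l.length ≤ n + 1 → ∀ prev, pvPrevAfter prev = false →
        scanA pvAfter (scanB pvBefore l) = pvGoB prev l := by
      intro l hl prev hprev
      match l with
      | [] => simp [scanB, scanA, pvGoB]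
      | c :: rest =>
        simp only [List.length_cons] at hl
        by_cases hc : c = ' '
        · subst hc
          match rest with
          | [] => simp [scanB, scanA, pvGoB, pvNextBefore, hprev]
          | b :: r =>
            by_cases hb : b ∈ pvBefore
            · have hbs : b ≠ ' ' := before_ne_space b hb
              have hba : b ∉ pvAfter := before_not_after b hb
              rw [show scanB pvBefore (' ' :: b :: r) = b :: scanB pvBefore r by
                simp [scanB, hb]]
              rw [scanA_cons pvAfter hba]
              rw [(ih r (by simp at hl; omega)).1 (some b) (pvPrevAfter_not_mem hba)]
              rw [show pvGoB prev (' ' :: b :: r) = pvGoB (some ' ') (b :: r) by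
                simp [pvGoB, pvNextBefore, hb]]
              rw [show pvGoB (some ' ') (b :: r) = b :: pvGoB (some b) r by
                simp [pvGoB, hbs]]
            · rw [show scanB pvBefore (' ' :: b :: r) = ' ' :: scanB pvBefore (b :: r) by
                simp [scanB, hb]]
              rw [scanA_cons pvAfter (by decide)]
              rw [(ih (b :: r) (by simp at hl ⊢; omega)).1 (some ' ') (by decide)]
              rw [show pvGoB prev (' ' :: b :: r) = ' ' :: pvGoB (some ' ') (b :: r) by
                simp [pvGoB, pvNextBefore, hb, hprev]]
        · rw [scanB_cons pvBefore hc]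
          by_cases hca : c ∈ pvAfter
          · rw [(ih rest (by omega)).2 c hca]
            rw [show pvGoB prev (c :: rest) = c :: pvGoB (some c) rest by
              simp [pvGoB, hc]]
          · rw [scanA_cons pvAfter hca, (ih rest (by omega)).1 (some c) (pvPrevAfter_not_mem hca)]
            rw [show pvGoB prev (c :: rest) = c :: pvGoB (some c) rest by
              simp [pvGoB, hc]]
    refine ⟨H1 l h, ?_⟩
    intro a ha
    match l with
    | [] => simp [scanB, scanA, pvGoB]
    | c :: rest =>
      simp only [List.length_cons] at h
      by_cases hc : c = ' '
      · subst hc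
        match rest with
        | [] =>
          simp [scanB, scanA, pvGoB, pvNextBefore, pvPrevAfter, ha]
        | b :: r =>
          by_cases hb : b ∈ pvBefore
          · have hbs : b ≠ ' ' := before_ne_space b hb
            have hba : b ∉ pvAfter := before_not_after b hb
            rw [show scanB pvBefore (' ' :: b :: r) = b :: scanB pvBefore r by
              simp [scanB, hb]]
            rw [show scanA pvAfter (a :: b :: scanB pvBefore r)
                = a :: scanA pvAfter (b :: scanB pvBefore r) by simp [scanA, hbs]]
            rw [scanA_cons pvAfter hba]
            rw [(ih r (by simp at h; omega)).1 (some b) (pvPrevAfter_not_mem hba)]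
            rw [show pvGoB (some a) (' ' :: b :: r) = pvGoB (some ' ') (b :: r) by
              simp [pvGoB, pvNextBefore, hb]]
            rw [show pvGoB (some ' ') (b :: r) = b :: pvGoB (some b) r by
              simp [pvGoB, hbs]]
          · rw [show scanB pvBefore (' ' :: b :: r) = ' ' :: scanB pvBefore (b :: r) by
              simp [scanB, hb]]
            rw [show scanA pvAfter (a :: ' ' :: scanB pvBefore (b :: r))
                = a :: scanA pvAfter (scanB pvBefore (b :: r)) by
              simp [scanA, ha]]
            rw [H1 (b :: r) (by simp at h ⊢; omega) (some ' ') (by decide)]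
            rw [show pvGoB (some a) (' ' :: b :: r) = pvGoB (some ' ') (b :: r) by
              simp [pvGoB, pvPrevAfter, ha]]
      · rw [scanB_cons pvBefore hc]
        rw [show scanA pvAfter (a :: c :: scanB pvBefore rest)
            = a :: scanA pvAfter (c :: scanB pvBefore rest) by simp [scanA, hc]]
        rw [← scanB_cons pvBefore hc]
        rw [H1 (c :: rest) (by simp; omega) (some ' ') (by decide)]
        rw [show pvGoB (some ' ') (c :: rest) = c :: pvGoB (some c) rest by
          simp [pvGoB, hc]]
        rw [show pvGoB (some a) (c :: rest) = c :: pvGoB (some c) rest by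
          simp [pvGoB, hc]]

-- A's twelve replace passes, on the character list, collapse into B's single pass
lemma chain_eq (l : List Char) :
    PySem.Chars.replace (PySem.Chars.replace (PySem.Chars.replace
      (PySem.Chars.replace (PySem.Chars.replace (PySem.Chars.replace
      (PySem.Chars.replace (PySem.Chars.replace (PySem.Chars.replace
      (PySem.Chars.replace (PySem.Chars.replace (PySem.Chars.replace
        l [' ', ','] [','])
        [' ', '.'] ['.'])
        [' ', '?'] ['?'])
        [' ', '!'] ['!'])
        [' ', ':'] [':'])
        [' ', ';'] [';'])
        [' ', ')'] [')'])
        [' ', ']'] [']'])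
        [' ', '}'] ['}'])
        ['(', ' '] ['('])
        ['[', ' '] ['['])
        ['{', ' '] ['{']
      = pvGoB none l := by
  simp only [replace_before, replace_after]
  rw [chainB '.' [','] (by decide) (by decide)
    (by intro q hq; fin_cases hq <;> decide) l.length l le_rfl]
  rw [chainB '?' ['.', ','] (by decide) (by decide)
    (by intro q hq; fin_cases hq <;> decide) l.length l le_rfl]
  rw [chainB '!' ['?', '.', ','] (by decide) (by decide)
    (by intro q hq; fin_cases hq <;> decide) l.length l le_rfl]
  rw [chainB ':' ['!', '?', '.', ','] (by decide) (by decide)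
    (by intro q hq; fin_cases hq <;> decide) l.length l le_rfl]
  rw [chainB ';' [':', '!', '?', '.', ','] (by decide) (by decide)
    (by intro q hq; fin_cases hq <;> decide) l.length l le_rfl]
  rw [chainB ')' [';', ':', '!', '?', '.', ','] (by decide) (by decide)
    (by intro q hq; fin_cases hq <;> decide) l.length l le_rfl]
  rw [chainB ']' [')', ';', ':', '!', '?', '.', ','] (by decide) (by decide)
    (by intro q hq; fin_cases hq <;> decide) l.length l le_rfl]
  rw [chainB '}' [']', ')', ';', ':', '!', '?', '.', ','] (by decide) (by decide)
    (by intro q hq; fin_cases hq <;> decide) l.length l le_rfl]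
  rw [chainA '[' ['('] (by decide) (by decide)
    (by intro q hq; fin_cases hq <;> decide) _ _ le_rfl]
  rw [chainA '{' ['[', '('] (by decide) (by decide)
    (by intro q hq; fin_cases hq <;> decide) _ _ le_rfl]
  rw [scanB_congr ['}', ']', ')', ';', ':', '!', '?', '.', ','] pvBefore
    (by intro c; simp [pvBefore]; tauto) l.length l le_rfl]
  rw [scanA_congr ['{', '[', '('] pvAfter
    (by intro c; simp [pvAfter]; tauto) _ _ le_rfl]
  exact (mainS l.length l le_rfl).1 none rfl

-- ===== VERDICT (by name: the statement is the Claim_ definition above) =====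
theorem remove_space_before_after_punctuation_spec : Claim_equal_remove_space_before_after_punctuation := by
  unfold Claim_equal_remove_space_before_after_punctuation
  intro text _
  unfold Spec_remove_space_before_after_punctuation
  unfold remove_space_before_after_punctuation remove_space_before_after_punctuation_alt
  simp only [List.foldl, PySem.Str.replace, String.toList_ofList]
  rw [chain_eq]
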